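-- pv_equiv track=rewrite | github.com/Artur23041989/python-development | home_work_8.py | find_repeated_words
-- ===== SOURCE A (Python) =====
-- def find_repeated_words(text):
--     words = [word.lower().strip('.,:;!?') for word in text.split()]
--     word_count = {}
--     for word in words:
--         if word in word_count:
--             word_count[word] += 1
--         else:
--             word_count[word] = 1
--     return {word: count for word, count in word_count.items() if count > 1}
-- ===== SOURCE B (Python) =====
-- def find_repeated_words(text):
--     words = [word.lower().strip('.,:;!?') for word in text.split()]
--     counts = {}
--     rest = sorted(words)
--     while rest:
--         w = rest[0]
--         run = 1
--         rest = rest[1:]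
--         while rest and rest[0] == w:
--             run += 1
--             rest = rest[1:]
--         if run > 1:
--             counts[w] = run
--     return {w: counts[w] for w in dict.fromkeys(words) if w in counts}
-- ===== Notes on version B (the rewrite author's own statement) =====
-- stated objective: alternative
-- what changed: Replaces A's incremental hash-map counting (one dict update per token, then a filter pass) with sort-then-scan: sort the normalized token list once, walk it peeling off consecutive runs of equal words and record run lengths > 1, then emit the repeated words in first-appearance order via dict.fromkeys.
import Mathlib
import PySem

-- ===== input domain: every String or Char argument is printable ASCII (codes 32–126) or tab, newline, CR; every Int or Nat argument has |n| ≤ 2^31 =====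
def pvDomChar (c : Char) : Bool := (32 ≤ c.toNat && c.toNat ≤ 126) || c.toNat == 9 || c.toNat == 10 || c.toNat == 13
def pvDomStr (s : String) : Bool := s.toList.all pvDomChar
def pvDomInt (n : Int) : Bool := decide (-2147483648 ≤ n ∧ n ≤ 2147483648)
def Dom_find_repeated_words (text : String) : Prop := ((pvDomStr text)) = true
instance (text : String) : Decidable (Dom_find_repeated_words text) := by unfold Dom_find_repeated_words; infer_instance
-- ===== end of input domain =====

-- B replaces A's hash-map counting loop by sort-then-scan: it sorts the token list, measures
-- consecutive runs of equal words and keeps the runs longer than one — alternative algorithm, same result.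

-- ===== PORT A =====
def find_repeated_words (text : String) : List (String × Int) :=
  let words := (PySem.Str.split₀ text).map
    (fun word => PySem.Str.stripChars (PySem.Str.lower word) ".,:;!?")
  let word_count := words.foldl
    (fun d word =>
      if d.contains word then d.insert word (d.getD word 0 + 1) else d.insert word 1)
    (PySem.Dict.empty : PySem.Dict String Int)
  -- the final dict comprehension {word: count for … if count > 1}
  ((word_count.items.filter (fun p => decide (p.2 > 1))).foldl
    (fun d p => d.insert p.1 p.2) (PySem.Dict.empty : PySem.Dict String Int)).items

-- ===== PORT B =====
-- the outer while loop of Source B: peel one run of equal words off the sorted list at a time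
-- (the inner 'while rest and rest[0] == w' is the takeWhile/dropWhile split of that prefix)
def pvRuns : List String → PySem.Dict String Int → PySem.Dict String Int
  | [], counts => counts
  | w :: rest, counts =>
      let run : Int := 1 + (rest.takeWhile (· == w)).length
      pvRuns (rest.dropWhile (· == w)) (if run > 1 then counts.insert w run else counts)
termination_by l => l.length
decreasing_by
  exact Nat.lt_succ_of_le (List.length_dropWhile_le _ _)


def find_repeated_words_alt (text : String) : List (String × Int) :=
  let words := (PySem.Str.split₀ text).map
    (fun word => PySem.Str.stripChars (PySem.Str.lower word) ".,:;!?")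
  let counts := pvRuns (PySem.List.sorted words (fun x => x) false) PySem.Dict.empty
  -- {w: counts[w] for w in dict.fromkeys(words) if w in counts}
  ((PySem.List.dedup words).foldl
    (fun d w => if counts.contains w then d.insert w (counts.getD w 0) else d)
    (PySem.Dict.empty : PySem.Dict String Int)).items

-- ===== PRECONDITION & SPEC =====
def Spec_find_repeated_words (text : String) (out : List (String × Int)) : Prop := out = find_repeated_words_alt text
instance (text : String) (out : List (String × Int)) : Decidable (Spec_find_repeated_words text out) := by unfold Spec_find_repeated_words; infer_instance

-- ===== CLAIM (what is proved, stated in full; the proofs are below) =====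
def Claim_equal_find_repeated_words : Prop := ∀ (text : String), Dom_find_repeated_words text → Spec_find_repeated_words text (find_repeated_words text)

-- ===== LEMMAS AND PROOFS =====

-- folding Set.add over elements already present leaves the set unchanged
lemma pv_foldl_add_all_eq (w : String) : ∀ (t : List String) (s : PySem.Set String),
    (∀ x ∈ t, x = w) → w ∈ s → List.foldl PySem.Set.add s t = s := by
  intro t
  induction t with
  | nil => intro s _ _; rfl
  | cons x t ih =>
    intro s hall hw
    have hx : x = w := hall x (by simp)
    subst hx
    have : PySem.Set.add s x = s := by
      simp [PySem.Set.add, PySem.Set.contains, hw]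
    rw [List.foldl_cons, this]
    exact ih s (fun y hy => hall y (by simp [hy])) hw


-- a head the tail never mentions is carried through a fold of Set.add
lemma pv_foldl_add_cons_notmem (w : String) : ∀ (t : List String) (s : List String), w ∉ t →
    List.foldl PySem.Set.add (w :: s) t = w :: List.foldl PySem.Set.add s t := by
  intro t
  induction t with
  | nil => intro s _; rfl
  | cons x t ih =>
    intro s hnm
    have hxw : ¬ (x = w) := fun h => hnm (by simp [h])
    have hadd : PySem.Set.add (w :: s) x = w :: PySem.Set.add s x := by
      by_cases hc : x ∈ s
      · simp [PySem.Set.add, PySem.Set.contains, hc]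
      · simp [PySem.Set.add, PySem.Set.contains, hc, hxw]
    rw [List.foldl_cons, hadd, List.foldl_cons]
    exact ih _ (fun h => hnm (by simp [h]))


-- in a sorted list, everything the leading run of w leaves behind differs from w
lemma pv_dropWhile_ne (w : String) : ∀ (l : List String), l.Pairwise (· ≤ ·) →
    (∀ y ∈ l, w ≤ y) → ∀ x ∈ l.dropWhile (· == w), x ≠ w := by
  intro l
  induction l with
  | nil => simp
  | cons a l ih =>
    intro hpw hle x hx
    by_cases ha : a = w
    · rw [List.dropWhile_cons] at hx
      simp [ha] at hx
      exact ih (List.pairwise_cons.mp hpw).2 (fun y hy => hle y (List.mem_cons_of_mem _ hy)) x hx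
    · rw [List.dropWhile_cons] at hx
      simp [ha] at hx
      have hwa : w < a := lt_of_le_of_ne (hle a (by simp)) (Ne.symm ha)
      rcases hx with rfl | hx
      · exact ha
      · have : a ≤ x := (List.pairwise_cons.mp hpw).1 x hx
        exact ne_of_gt (lt_of_lt_of_le hwa this)


-- run characterization: pvRuns on a sorted list collects exactly the words of count > 1, with their counts
lemma pvRuns_items : ∀ (n : Nat) (s : List String) (d : PySem.Dict String Int), s.length ≤ n →
    s.Pairwise (· ≤ ·) → d.keys.Nodup → (∀ x ∈ s, d.contains x = false) →
    (pvRuns s d).items = d.items ++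
      ((PySem.Set.ofList s).filter (fun u => decide (1 < (s.count u : Int)))).map
        (fun u => (u, (s.count u : Int))) := by
  intro n
  induction n with
  | zero =>
    intro s d hlen _ _ _
    have hs : s = [] := List.eq_nil_of_length_eq_zero (Nat.le_zero.mp hlen)
    subst hs
    simp [pvRuns, PySem.Set.ofList]
  | succ n ih =>
    intro s d hlen hpw hnd hfresh
    cases s with
    | nil => simp [pvRuns, PySem.Set.ofList]
    | cons w rest =>
      rw [pvRuns]
      have hw_le : ∀ y ∈ rest, w ≤ y := fun y hy => (List.pairwise_cons.mp hpw).1 y hy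
      have hpw_rest : rest.Pairwise (· ≤ ·) := (List.pairwise_cons.mp hpw).2
      have hne : ∀ x ∈ rest.dropWhile (· == w), x ≠ w := pv_dropWhile_ne w rest hpw_rest hw_le
      have hsame_all : ∀ x ∈ rest.takeWhile (· == w), x = w := by
        intro x hx
        have := List.mem_takeWhile_imp hx
        simpa using this
      have hwnm : w ∉ rest.dropWhile (· == w) := fun h => hne w h rfl
      have hcount0 : (rest.dropWhile (· == w)).count w = 0 := List.count_eq_zero.mpr hwnm
      have hsamecount : (rest.takeWhile (· == w)).count w = (rest.takeWhile (· == w)).length :=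
        List.count_eq_length.mpr (fun b hb => (hsame_all b hb).symm)
      have hrest_eq : rest.takeWhile (· == w) ++ rest.dropWhile (· == w) = rest :=
        List.takeWhile_append_dropWhile
      have hsplit : ∀ u : String, rest.count u =
          (rest.takeWhile (· == w)).count u + (rest.dropWhile (· == w)).count u := by
        intro u
        conv_lhs => rw [← hrest_eq]
        rw [List.count_append]
      have hcw : (w :: rest).count w = (rest.takeWhile (· == w)).length + 1 := by
        rw [List.count_cons_self, hsplit, hsamecount, hcount0]
      have hcu : ∀ u ∈ rest.dropWhile (· == w), (w :: rest).count u = (rest.dropWhile (· == w)).count u := by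
        intro u hu
        have huw : u ≠ w := hne u hu
        have h1 : (rest.takeWhile (· == w)).count u = 0 :=
          List.count_eq_zero.mpr (fun h => huw (hsame_all u h))
        rw [List.count_cons, hsplit, h1]
        simp [Ne.symm huw]
      have hofList : PySem.Set.ofList (w :: rest) = w :: PySem.Set.ofList (rest.dropWhile (· == w)) := by
        rw [PySem.Set.ofList_eq_foldl, List.foldl_cons]
        have h0 : PySem.Set.add [] w = [w] := rfl
        rw [h0, ← hrest_eq, List.foldl_append,
          pv_foldl_add_all_eq w _ [w] hsame_all (by simp),
          pv_foldl_add_cons_notmem w _ [] hwnm, ← PySem.Set.ofList_eq_foldl, hrest_eq]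
      have htail : ((PySem.Set.ofList (rest.dropWhile (· == w))).filter
            (fun u => decide (1 < (((w :: rest).count u : Int))))).map
            (fun u => (u, ((w :: rest).count u : Int)))
          = ((PySem.Set.ofList (rest.dropWhile (· == w))).filter
            (fun u => decide (1 < (((rest.dropWhile (· == w)).count u : Int))))).map
            (fun u => (u, ((rest.dropWhile (· == w)).count u : Int))) := by
        rw [List.filter_congr (fun u hu => by
          rw [hcu u ((PySem.Set.mem_ofList _ _).mp hu)])]
        apply List.map_congr_left
        intro u hu
        rw [hcu u ((PySem.Set.mem_ofList _ _).mp (List.mem_of_mem_filter hu))]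
      have hlen' : (rest.dropWhile (· == w)).length ≤ n :=
        le_trans (List.length_dropWhile_le _ _) (Nat.le_of_succ_le_succ hlen)
      have hpw' : (rest.dropWhile (· == w)).Pairwise (· ≤ ·) :=
        hpw_rest.sublist (List.dropWhile_sublist _)
      by_cases hrun : ((rest.takeWhile (· == w)).length : Int) + 1 > 1
      · -- a real run: same nonempty, w is inserted
        have hlenpos : 0 < (rest.takeWhile (· == w)).length := by exact_mod_cast by omega
        have hcontw : d.contains w = false := hfresh w (by simp)
        have hgt : (1 : Int) + ((rest.takeWhile (· == w)).length : Int) > 1 := by omega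
        rw [if_pos hgt]
        have hfresh' : ∀ x ∈ rest.dropWhile (· == w),
            (d.insert w (1 + ((rest.takeWhile (· == w)).length : Int))).contains x = false := by
          intro x hx
          rw [PySem.Dict.contains_insert]
          have h1 : (x == w) = false := by simp [hne x hx]
          have h2 : d.contains x = false := hfresh x (by
            exact List.mem_cons_of_mem _ ((List.dropWhile_sublist _).mem hx))
          simp [h1, h2]
        have hkeys' : (d.insert w (1 + ((rest.takeWhile (· == w)).length : Int))).keys.Nodup := by
          rw [PySem.Dict.keys_insert_of_not_contains d _ hcontw]
          have hcw' : w ∉ d.keys := fun hm => by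
            simp [(PySem.Dict.contains_iff_mem_keys d w).mpr hm] at hcontw
          refine List.Nodup.append hnd (by simp) ?_
          intro a ha hb
          exact hcw' (List.mem_singleton.mp hb ▸ ha)
        rw [ih _ _ hlen' hpw' hkeys' hfresh']
        rw [PySem.Dict.items_insert_of_not_contains d _ hcontw]
        rw [hofList]
        rw [List.filter_cons]
        have hPw : decide (1 < (((w :: rest).count w : Int))) = true := by
          rw [hcw]; push_cast; simp; omega
        rw [if_pos (by simpa using hPw)]
        rw [List.map_cons, htail]
        have hval : ((w :: rest).count w : Int) = 1 + ((rest.takeWhile (· == w)).length : Int) := by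
          rw [hcw]; push_cast; ring
        rw [hval, List.append_assoc, List.singleton_append]
      · -- run of length 1: same is empty, w not repeated, skipped
        have hlen0 : (rest.takeWhile (· == w)).length = 0 := by omega
        have hsame0 : rest.takeWhile (· == w) = [] := List.eq_nil_of_length_eq_zero hlen0
        have hgt : ¬ ((1 : Int) + ((rest.takeWhile (· == w)).length : Int) > 1) := by omega
        rw [if_neg hgt]
        rw [ih _ _ hlen' hpw' hnd (fun x hx => hfresh x (by
          exact List.mem_cons_of_mem _ ((List.dropWhile_sublist _).mem hx)))]
        rw [hofList, List.filter_cons]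
        have hPw : decide (1 < (((w :: rest).count w : Int))) = false := by
          rw [hcw, hlen0]; simp
        rw [if_neg (by simp at hPw ⊢; exact_mod_cast hPw)]
        rw [htail]

-- the equality itself, proved from the run characterization
theorem pv_main : ∀ (text : String), find_repeated_words text = find_repeated_words_alt text := by
  intro text
  unfold find_repeated_words find_repeated_words_alt
  dsimp only
  generalize ((PySem.Str.split₀ text).map
    (fun word => PySem.Str.stripChars (PySem.Str.lower word) ".,:;!?")) = ws
  -- A side: the counting loop is Counter(ws)
  have hfun : (fun (d : PySem.Dict String Int) word =>
      if d.contains word then d.insert word (d.getD word 0 + 1) else d.insert word 1)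
      = fun d word => d.insert word (d.getD word 0 + 1) := by
    funext d w
    by_cases hc : d.contains w
    · simp [hc]
    · have hc' : d.contains w = false := by simpa using hc
      simp [hc', PySem.Dict.getD_of_not_contains d 0 hc']
  rw [hfun, PySem.Dict.foldl_insert_getD_add_one_eq_counter, PySem.Dict.items_counter,
    List.filter_map]
  rw [PySem.Dict.items_foldl_insert_fresh _ Prod.fst Prod.snd PySem.Dict.empty
    (fun a _ => PySem.Dict.contains_empty a.1) ?anodup]
  case anodup =>
    rw [List.map_map]
    rw [show (Prod.fst ∘ fun k => (k, ((List.count k ws : Int)))) = id from rfl, List.map_id]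
    exact (PySem.Set.nodup_ofList ws).filter _
  -- B side
  have hpwS : (PySem.List.sorted ws (fun x => x) false).Pairwise (· ≤ ·) := by
    simpa using PySem.List.sorted_pairwise ws (fun x => x)
  have hperm : (PySem.List.sorted ws (fun x => x) false).Perm ws :=
    PySem.List.sorted_perm ws (fun x => x) false
  have hcnt : ∀ u, (PySem.List.sorted ws (fun x => x) false).count u = ws.count u :=
    fun u => hperm.count_eq u
  have hitems : (pvRuns (PySem.List.sorted ws (fun x => x) false) PySem.Dict.empty).items
      = ((PySem.Set.ofList (PySem.List.sorted ws (fun x => x) false)).filter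
          (fun u => decide (1 < (((PySem.List.sorted ws (fun x => x) false).count u : Int))))).map
          (fun u => (u, ((PySem.List.sorted ws (fun x => x) false).count u : Int))) := by
    have := pvRuns_items (PySem.List.sorted ws (fun x => x) false).length
      (PySem.List.sorted ws (fun x => x) false) PySem.Dict.empty le_rfl hpwS
      (by simp [PySem.Dict.keys_empty]) (fun x _ => PySem.Dict.contains_empty x)
    simpa using this
  have hkeys : (pvRuns (PySem.List.sorted ws (fun x => x) false) PySem.Dict.empty).keys
      = (PySem.Set.ofList (PySem.List.sorted ws (fun x => x) false)).filter
          (fun u => decide (1 < (((PySem.List.sorted ws (fun x => x) false).count u : Int)))) := by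
    simp only [PySem.Dict.keys, hitems, List.map_map]
    simp [Function.comp_def]
  have hndk : (pvRuns (PySem.List.sorted ws (fun x => x) false) PySem.Dict.empty).keys.Nodup := by
    rw [hkeys]
    exact (PySem.Set.nodup_ofList _).filter _
  have hiff : ∀ u, (pvRuns (PySem.List.sorted ws (fun x => x) false) PySem.Dict.empty).contains u = true
      ↔ (1 : Int) < (ws.count u : Int) := by
    intro u
    rw [PySem.Dict.contains_iff_mem_keys, hkeys, List.mem_filter]
    constructor
    · rintro ⟨_, hp⟩
      have := of_decide_eq_true hp
      rwa [hcnt] at this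
    · intro h
      have h1 : 1 < ws.count u := by exact_mod_cast h
      refine ⟨(PySem.Set.mem_ofList _ _).mpr ?_, by rw [hcnt]; exact decide_eq_true h⟩
      have : 0 < (PySem.List.sorted ws (fun x => x) false).count u := by rw [hcnt]; omega
      exact List.count_pos_iff.mp this
  have hcont : ∀ u, (pvRuns (PySem.List.sorted ws (fun x => x) false) PySem.Dict.empty).contains u
      = decide ((1 : Int) < (ws.count u : Int)) := by
    intro u
    by_cases hq : (1 : Int) < (ws.count u : Int)
    · simp [hq, (hiff u).mpr hq]
    · simp only [hq, decide_false]
      exact Bool.eq_false_iff.mpr (fun hc => hq ((hiff u).mp hc))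
  have hgetD : ∀ u, (pvRuns (PySem.List.sorted ws (fun x => x) false) PySem.Dict.empty).contains u = true →
      (pvRuns (PySem.List.sorted ws (fun x => x) false) PySem.Dict.empty).getD u 0 = (ws.count u : Int) := by
    intro u hc
    have hmemf : u ∈ (PySem.Set.ofList (PySem.List.sorted ws (fun x => x) false)).filter
        (fun u => decide (1 < (((PySem.List.sorted ws (fun x => x) false).count u : Int)))) := by
      rw [← hkeys]
      exact (PySem.Dict.contains_iff_mem_keys _ _).mp hc
    have hmemi : (u, ((PySem.List.sorted ws (fun x => x) false).count u : Int))
        ∈ (pvRuns (PySem.List.sorted ws (fun x => x) false) PySem.Dict.empty).items := by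
      rw [hitems]
      exact List.mem_map_of_mem hmemf
    rw [PySem.Dict.getD_of_mem_items _ hmemi hndk 0, hcnt]
  rw [PySem.List.dedup_eq_ofList]
  rw [PySem.List.foldl_if_eq_foldl_filter]
  rw [PySem.Dict.items_foldl_insert_fresh _ (fun w => w)
    (fun w => (pvRuns (PySem.List.sorted ws (fun x => x) false) PySem.Dict.empty).getD w 0)
    PySem.Dict.empty (fun a _ => PySem.Dict.contains_empty a) ?bnodup]
  case bnodup =>
    simpa using ((PySem.Set.nodup_ofList ws).filter _)
  rw [List.filter_congr (fun u _ => hcont u)]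
  simp only [show (PySem.Dict.empty : PySem.Dict String Int).items = [] from rfl,
    List.nil_append]
  rw [List.map_map]
  refine List.map_congr_left ?_
  intro u hu
  have hcu : (pvRuns (PySem.List.sorted ws (fun x => x) false) PySem.Dict.empty).contains u = true := by
    rw [hcont u]
    exact (List.mem_filter.mp hu).2
  rw [hgetD u hcu]
  rfl

-- ===== VERDICT (by name: the statement is the Claim_ definition above) =====
theorem find_repeated_words_spec : Claim_equal_find_repeated_words := by
  intro text _
  exact pv_main text
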